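-- pv_equiv track=rewrite | github.com/perslev/psg-utils | psg_utils/hypnogram/utils.py | get_light_events
-- ===== SOURCE A (Python) =====
-- def get_light_events(events, first_and_last_only=False):
--     """
--
--     :param events:
--     :return:
--     """
--     # Filter to keep only lights on and lights off events
--     light_events = list(filter(lambda e: "light" in e[-1].lower(), events))
--
--     # Make sure events are sorted by init time
--     light_events = sorted(light_events, key=lambda x: x[0])
--
--     # Standardize to (onset, duration, "LIGHTS ON/OFF (STOP/START)") tuples
--     # Also subtract offsets (if array was shifted in time due to trimming, e.g. with start/stop PSG events)
--     light_events = [(e[0], e[1], "LIGHTS ON (STOP)" if "on" in e[-1].lower() else "LIGHTS OFF (START)")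
--                     for e in light_events]
--
--     if light_events and first_and_last_only:
--         off_events = [lights for lights in light_events if lights[-1] == "LIGHTS OFF (START)"]
--         on_events = [lights for lights in light_events if lights[-1] == "LIGHTS ON (STOP)"]
--         light_events = []
--         if off_events:
--             light_events.append(off_events[0])
--         if on_events:
--             light_events.append(on_events[-1])
--     return light_events
-- ===== SOURCE B (Python) =====
-- def get_light_events(events, first_and_last_only=False):
--     # One comprehension merges the filter and standardize steps.
--     std = [(e[0], e[1],
--             "LIGHTS ON (STOP)" if "on" in e[-1].lower() else "LIGHTS OFF (START)")
--            for e in events if "light" in e[-1].lower()]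
--     if not std or not first_and_last_only:
--         return sorted(std, key=lambda x: x[0])
--     # Single linear pass instead of sort + two filters + indexing.
--     first_off = None  # earliest "LIGHTS OFF (START)" (strict < keeps the first on ties)
--     last_on = None    # latest "LIGHTS ON (STOP)" (>= keeps the last on ties)
--     for ev in std:
--         if ev[2] == "LIGHTS OFF (START)":
--             if first_off is None or ev[0] < first_off[0]:
--                 first_off = ev
--         else:
--             if last_on is None or ev[0] >= last_on[0]:
--                 last_on = ev
--     out = []
--     if first_off is not None:
--         out.append(first_off)
--     if last_on is not None:
--         out.append(last_on)
--     return out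
-- ===== Notes on version B (the rewrite author's own statement) =====
-- stated objective: alternative
-- what changed: B merges the filter and standardize steps into one comprehension and, in the first_and_last_only branch, replaces sort + two filtered lists + indexing by a single unsorted linear pass tracking the earliest LIGHTS OFF (strict <) and latest LIGHTS ON (>=); it sorts only in the default branch.
import Mathlib
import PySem

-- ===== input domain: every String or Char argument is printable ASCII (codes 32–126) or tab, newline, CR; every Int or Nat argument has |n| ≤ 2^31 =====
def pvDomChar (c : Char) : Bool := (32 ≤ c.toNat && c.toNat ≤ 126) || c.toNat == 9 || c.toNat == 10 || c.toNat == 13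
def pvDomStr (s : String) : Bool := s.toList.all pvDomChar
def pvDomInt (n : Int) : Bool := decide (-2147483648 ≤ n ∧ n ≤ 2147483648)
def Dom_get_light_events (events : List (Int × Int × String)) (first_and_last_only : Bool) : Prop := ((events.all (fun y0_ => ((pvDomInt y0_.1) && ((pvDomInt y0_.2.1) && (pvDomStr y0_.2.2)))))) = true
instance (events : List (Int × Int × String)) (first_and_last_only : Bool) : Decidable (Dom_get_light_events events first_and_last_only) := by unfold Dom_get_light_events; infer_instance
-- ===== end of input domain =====

-- B merges filter+standardize into one pass and, for first_and_last_only, replaces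
-- sort+filter+indexing by a single linear min/max scan (alternative decomposition).


-- ===== PORT A =====
def get_light_events (events : List (Int × Int × String)) (first_and_last_only : Bool) : List (Int × Int × String) :=
  -- light_events = list(filter(lambda e: "light" in e[-1].lower(), events))
  let le1 := events.filter (fun e => PySem.Str.isIn "light" (PySem.Str.lower e.2.2))
  -- light_events = sorted(light_events, key=lambda x: x[0])
  let le2 := PySem.List.sorted le1 (fun x => x.1) false
  -- standardize comprehension
  let le3 := le2.map (fun e => (e.1, e.2.1,
      if PySem.Str.isIn "on" (PySem.Str.lower e.2.2) then "LIGHTS ON (STOP)" else "LIGHTS OFF (START)"))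
  if le3 ≠ [] ∧ first_and_last_only = true then
    let off_events := le3.filter (fun l => l.2.2 == "LIGHTS OFF (START)")
    let on_events := le3.filter (fun l => l.2.2 == "LIGHTS ON (STOP)")
    -- light_events = []; append off_events[0] / on_events[-1] if nonempty
    (match off_events with | [] => [] | x :: _ => [x]) ++
    (match on_events.getLast? with | none => [] | some y => [y])
  else le3

-- ===== PORT B =====
-- update for the earliest "LIGHTS OFF (START)": replace only on strictly smaller onset
def glMinStep (m : Option (Int × Int × String)) (ev : Int × Int × String) : Option (Int × Int × String) :=
  match m with | none => some ev | some b => if ev.1 < b.1 then some ev else some b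

-- update for the latest "LIGHTS ON (STOP)": replace on greater-or-equal onset
def glMaxStep (m : Option (Int × Int × String)) (ev : Int × Int × String) : Option (Int × Int × String) :=
  match m with | none => some ev | some b => if b.1 ≤ ev.1 then some ev else some b

def glStep (st : Option (Int × Int × String) × Option (Int × Int × String))
    (ev : Int × Int × String) : Option (Int × Int × String) × Option (Int × Int × String) :=
  if ev.2.2 == "LIGHTS OFF (START)" then (glMinStep st.1 ev, st.2)
  else (st.1, glMaxStep st.2 ev)

def get_light_events_alt (events : List (Int × Int × String)) (first_and_last_only : Bool) : List (Int × Int × String) :=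
  -- one comprehension: filter + standardize
  let std := events.filterMap (fun e =>
    if PySem.Str.isIn "light" (PySem.Str.lower e.2.2) then
      some (e.1, e.2.1,
        if PySem.Str.isIn "on" (PySem.Str.lower e.2.2) then "LIGHTS ON (STOP)" else "LIGHTS OFF (START)")
    else none)
  if std = [] ∨ first_and_last_only = false then
    PySem.List.sorted std (fun x => x.1) false
  else
    -- single linear pass over the UNSORTED standardized events
    let p := std.foldl glStep (none, none)
    (match p.1 with | none => [] | some x => [x]) ++
    (match p.2 with | none => [] | some y => [y])

-- ===== PRECONDITION & SPEC =====
def Spec_get_light_events (events : List (Int × Int × String)) (first_and_last_only : Bool) (out : List (Int × Int × String)) : Prop := out = get_light_events_alt events first_and_last_only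
instance (events : List (Int × Int × String)) (first_and_last_only : Bool) (out : List (Int × Int × String)) : Decidable (Spec_get_light_events events first_and_last_only out) := by unfold Spec_get_light_events; infer_instance

-- ===== CLAIM (what is proved, stated in full; the proofs are below) =====
def Claim_equal_get_light_events : Prop := ∀ (events : List (Int × Int × String)) (first_and_last_only : Bool), Dom_get_light_events events first_and_last_only → Spec_get_light_events events first_and_last_only (get_light_events events first_and_last_only)

-- ===== LEMMAS AND PROOFS =====

-- the comparator used by PySem's stable insertion sort with key = first component
def glBefore (a b : Int × Int × String) : Bool := decide (a.1 < b.1)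

-- the standardization map
def glF (e : Int × Int × String) : Int × Int × String :=
  (e.1, e.2.1, if PySem.Str.isIn "on" (PySem.Str.lower e.2.2) then "LIGHTS ON (STOP)" else "LIGHTS OFF (START)")

theorem gl_filterMap_eq (events : List (Int × Int × String)) :
    (events.filterMap (fun e =>
      if PySem.Str.isIn "light" (PySem.Str.lower e.2.2) then
        some (e.1, e.2.1,
          if PySem.Str.isIn "on" (PySem.Str.lower e.2.2) then "LIGHTS ON (STOP)" else "LIGHTS OFF (START)")
      else none))
    = (events.filter (fun e => PySem.Str.isIn "light" (PySem.Str.lower e.2.2))).map glF := by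
  induction events with
  | nil => rfl
  | cons e t ih =>
    by_cases h : PySem.Str.isIn "light" (PySem.Str.lower e.2.2) = true <;>
      simp only [List.filterMap_cons, List.filter_cons, h, ih, List.map_cons, glF,
        if_true, if_false, Bool.false_eq_true]

theorem gl_map_insertBy (x : Int × Int × String) (ys : List (Int × Int × String)) :
    (PySem.List.insertBy glBefore x ys).map glF
      = PySem.List.insertBy glBefore (glF x) (ys.map glF) := by
  induction ys with
  | nil => rfl
  | cons y t ih =>
    have hfb : glBefore (glF x) (glF y) = glBefore x y := by simp [glBefore, glF]
    by_cases h : glBefore x y = true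
    · simp [PySem.List.insertBy, h, hfb]
    · simp [PySem.List.insertBy, h, hfb, ih]

theorem gl_sorted_map (xs : List (Int × Int × String)) :
    (PySem.List.sorted xs (fun x => x.1) false).map glF
      = PySem.List.sorted (xs.map glF) (fun x => x.1) false := by
  rw [PySem.List.sorted_eq_foldl_insertBy, PySem.List.sorted_eq_foldl_insertBy]
  have key : ∀ (l acc : List (Int × Int × String)),
      (l.foldl (fun acc x => PySem.List.insertBy glBefore x acc) acc).map glF
        = (l.map glF).foldl (fun acc x => PySem.List.insertBy glBefore x acc) (acc.map glF) := by
    intro l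
    induction l with
    | nil => intro acc; rfl
    | cons x t ih =>
      intro acc
      simp only [List.foldl_cons, List.map_cons, ih, gl_map_insertBy]
  exact key xs []

-- insertBy preserves pairwise key-ordering
theorem gl_pairwise_insertBy (x : Int × Int × String) (ys : List (Int × Int × String))
    (h : ys.Pairwise (fun a b => a.1 ≤ b.1)) :
    (PySem.List.insertBy glBefore x ys).Pairwise (fun a b => a.1 ≤ b.1) := by
  induction ys with
  | nil => simp [PySem.List.insertBy]
  | cons y t ih =>
    rcases List.pairwise_cons.mp h with ⟨hy, ht⟩
    by_cases hb : glBefore x y = true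
    · have hxy : x.1 < y.1 := by simpa [glBefore] using hb
      simp only [PySem.List.insertBy, hb, if_pos]
      refine List.pairwise_cons.mpr ⟨?_, h⟩
      intro z hz
      rcases List.mem_cons.mp hz with rfl | hz
      · exact le_of_lt hxy
      · exact le_of_lt (lt_of_lt_of_le hxy (hy z hz))
    · have hyx : y.1 ≤ x.1 := by
        have : ¬ x.1 < y.1 := by simpa [glBefore] using hb
        omega
      simp only [PySem.List.insertBy, hb, if_neg, Bool.false_eq_true, not_false_iff]
      refine List.pairwise_cons.mpr ⟨?_, ih ht⟩
      intro z hz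
      rcases (PySem.List.mem_insertBy glBefore x z t).mp hz with rfl | hz
      · exact hyx
      · exact hy z hz

theorem gl_insertBy_cons_of_forall (x : Int × Int × String) (zs : List (Int × Int × String))
    (h : ∀ z ∈ zs, glBefore x z = true) :
    PySem.List.insertBy glBefore x zs = x :: zs := by
  cases zs with
  | nil => rfl
  | cons z t => simp [PySem.List.insertBy, h z (by simp)]

theorem gl_filter_insertBy (q : (Int × Int × String) → Bool) (x : Int × Int × String)
    (ys : List (Int × Int × String)) (h : ys.Pairwise (fun a b => a.1 ≤ b.1)) :
    (PySem.List.insertBy glBefore x ys).filter q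
      = if q x then PySem.List.insertBy glBefore x (ys.filter q) else ys.filter q := by
  induction ys with
  | nil => by_cases hx : q x = true <;> simp [PySem.List.insertBy, List.filter, hx]
  | cons y t ih =>
    rcases List.pairwise_cons.mp h with ⟨hy, ht⟩
    by_cases hb : glBefore x y = true
    · have hxy : x.1 < y.1 := by simpa [glBefore] using hb
      simp only [PySem.List.insertBy, hb, if_pos]
      by_cases hx : q x = true
      · by_cases hqy : q y = true
        · simp [hx, hqy, PySem.List.insertBy, hb]
        · have hall : ∀ z ∈ (t.filter q), glBefore x z = true := by
            intro z hz
            have hzt : z ∈ t := List.mem_of_mem_filter hz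
            have : x.1 < z.1 := lt_of_lt_of_le hxy (hy z hzt)
            simpa [glBefore] using this
          simp [hx, hqy, gl_insertBy_cons_of_forall x (t.filter q) hall]
      · simp [List.filter_cons, hx]
    · simp only [PySem.List.insertBy, hb, if_neg, Bool.false_eq_true, not_false_iff]
      by_cases hqy : q y = true
      · by_cases hx : q x = true
        · have hb' : ¬ glBefore x y = true := hb
          simp [hqy, hx, ih ht, PySem.List.insertBy, hb']
        · simp [hqy, hx, ih ht]
      · simp [hqy, ih ht]

theorem gl_sorted_filter (q : (Int × Int × String) → Bool) (xs : List (Int × Int × String)) :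
    (PySem.List.sorted xs (fun x => x.1) false).filter q
      = PySem.List.sorted (xs.filter q) (fun x => x.1) false := by
  rw [PySem.List.sorted_eq_foldl_insertBy, PySem.List.sorted_eq_foldl_insertBy]
  have key : ∀ (l acc : List (Int × Int × String)), acc.Pairwise (fun a b => a.1 ≤ b.1) →
      (l.foldl (fun acc x => PySem.List.insertBy glBefore x acc) acc).filter q
        = (l.filter q).foldl (fun acc x => PySem.List.insertBy glBefore x acc) (acc.filter q) := by
    intro l
    induction l with
    | nil => intro acc _; rfl
    | cons x t ih =>
      intro acc hacc
      have h1 := ih (PySem.List.insertBy glBefore x acc) (gl_pairwise_insertBy x acc hacc)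
      by_cases hx : q x = true <;>
        simp [List.foldl_cons, hx, h1, gl_filter_insertBy q x acc hacc]
  exact key xs [] (by simp)

theorem gl_head?_insertBy (x : Int × Int × String) (ys : List (Int × Int × String)) :
    (PySem.List.insertBy glBefore x ys).head? = glMinStep ys.head? x := by
  cases ys with
  | nil => rfl
  | cons y t =>
    by_cases h : x.1 < y.1 <;>
      simp [PySem.List.insertBy, glBefore, glMinStep, h]

theorem gl_head?_foldl (l : List (Int × Int × String)) (acc : List (Int × Int × String)) :
    (l.foldl (fun acc x => PySem.List.insertBy glBefore x acc) acc).head?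
      = l.foldl glMinStep acc.head? := by
  induction l generalizing acc with
  | nil => rfl
  | cons x t ih => simp [List.foldl_cons, ih, gl_head?_insertBy]

theorem gl_getLast?_insertBy (x : Int × Int × String) (ys : List (Int × Int × String))
    (h : ys.Pairwise (fun a b => a.1 ≤ b.1)) :
    (PySem.List.insertBy glBefore x ys).getLast? = glMaxStep ys.getLast? x := by
  induction ys with
  | nil => rfl
  | cons y t ih =>
    rcases List.pairwise_cons.mp h with ⟨hy, ht⟩
    by_cases hb : glBefore x y = true
    · have hxy : x.1 < y.1 := by simpa [glBefore] using hb
      simp only [PySem.List.insertBy, hb, if_pos]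
      obtain ⟨l, hl⟩ : ∃ l, (y :: t).getLast? = some l := by
        cases hg : (y :: t).getLast? with
        | none => simp at hg
        | some l => exact ⟨l, rfl⟩
      have hlm : l ∈ y :: t := List.mem_of_getLast? hl
      have hyl : y.1 ≤ l.1 := by
        rcases List.mem_cons.mp hlm with rfl | hlm
        · exact le_refl _
        · exact hy l hlm
      have hnle : ¬ l.1 ≤ x.1 := by omega
      rw [List.getLast?_cons_cons, hl]
      simp [glMaxStep, hnle]
    · have hyx : y.1 ≤ x.1 := by
        have : ¬ x.1 < y.1 := by simpa [glBefore] using hb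
        omega
      simp only [PySem.List.insertBy, hb, if_neg, Bool.false_eq_true, not_false_iff]
      cases t with
      | nil => simp [PySem.List.insertBy, glMaxStep, hyx]
      | cons z zs =>
        have hne : PySem.List.insertBy glBefore x (z :: zs) ≠ [] := by
          by_cases hzz : glBefore x z = true <;> simp [PySem.List.insertBy, hzz]
        have hcons : ∀ (ws : List (Int × Int × String)), ws ≠ [] → (y :: ws).getLast? = ws.getLast? := by
          intro ws hws
          cases ws with
          | nil => exact absurd rfl hws
          | cons w ws' => exact List.getLast?_cons_cons
        rw [hcons _ hne, ih ht, List.getLast?_cons_cons]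

theorem gl_getLast?_foldl (l : List (Int × Int × String)) (acc : List (Int × Int × String))
    (h : acc.Pairwise (fun a b => a.1 ≤ b.1)) :
    (l.foldl (fun acc x => PySem.List.insertBy glBefore x acc) acc).getLast?
      = l.foldl glMaxStep acc.getLast? := by
  induction l generalizing acc with
  | nil => rfl
  | cons x t ih =>
    simp only [List.foldl_cons]
    rw [ih (PySem.List.insertBy glBefore x acc) (gl_pairwise_insertBy x acc h),
        gl_getLast?_insertBy x acc h]

-- a paired min/max fold over a list of OFF/ON-labelled events splits into two filtered folds
theorem gl_foldl_split (l : List (Int × Int × String))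
    (h : ∀ e ∈ l, e.2.2 = "LIGHTS OFF (START)" ∨ e.2.2 = "LIGHTS ON (STOP)")
    (st : Option (Int × Int × String) × Option (Int × Int × String)) :
    l.foldl glStep st
      = ((l.filter (fun e => e.2.2 == "LIGHTS OFF (START)")).foldl glMinStep st.1,
         (l.filter (fun e => e.2.2 == "LIGHTS ON (STOP)")).foldl glMaxStep st.2) := by
  induction l generalizing st with
  | nil => rfl
  | cons e t ih =>
    have ht : ∀ x ∈ t, x.2.2 = "LIGHTS OFF (START)" ∨ x.2.2 = "LIGHTS ON (STOP)" :=
      fun x hx => h x (List.mem_cons_of_mem _ hx)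
    rcases h e (List.mem_cons_self) with hoff | hon
    · have h1 : (e.2.2 == "LIGHTS OFF (START)") = true := by simp [hoff]
      have h2 : (e.2.2 == "LIGHTS ON (STOP)") = false := by simp [hoff]
      simp [List.foldl_cons, h1, h2, glStep, ih ht]
    · have h1 : (e.2.2 == "LIGHTS OFF (START)") = false := by simp [hon]
      have h2 : (e.2.2 == "LIGHTS ON (STOP)") = true := by simp [hon]
      simp [List.foldl_cons, h1, h2, glStep, ih ht]

theorem gl_labels (xs : List (Int × Int × String)) :
    ∀ e ∈ xs.map glF, e.2.2 = "LIGHTS OFF (START)" ∨ e.2.2 = "LIGHTS ON (STOP)" := by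
  intro e he
  rcases List.mem_map.mp he with ⟨x, _, rfl⟩
  by_cases h : PySem.Str.isIn "on" (PySem.Str.lower x.2.2) = true <;> simp [glF]

theorem gl_main (events : List (Int × Int × String)) (flo : Bool) :
    get_light_events events flo = get_light_events_alt events flo := by
  unfold get_light_events get_light_events_alt
  simp only [gl_filterMap_eq]
  set F := events.filter (fun e => PySem.Str.isIn "light" (PySem.Str.lower e.2.2)) with hF
  set L := F.map glF with hL
  have hM : (PySem.List.sorted F (fun x => x.1) false).map glF
      = PySem.List.sorted L (fun x => x.1) false := gl_sorted_map F
  have hmapf : (PySem.List.sorted F (fun x => x.1) false).map (fun e => (e.1, e.2.1,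
      if PySem.Str.isIn "on" (PySem.Str.lower e.2.2) then "LIGHTS ON (STOP)" else "LIGHTS OFF (START)"))
      = (PySem.List.sorted F (fun x => x.1) false).map glF := rfl
  rw [hmapf, hM]
  have hnil : PySem.List.sorted L (fun x => x.1) false = [] ↔ L = [] :=
    PySem.List.sorted_eq_nil_iff L _ false
  by_cases hc : L = [] ∨ flo = false
  · have hc' : ¬ (PySem.List.sorted L (fun x => x.1) false ≠ [] ∧ flo = true) := by
      rcases hc with h | h
      · simp [h, PySem.List.sorted_eq_nil_iff]
      · simp [h]
    simp only [if_neg hc', if_pos hc]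
  · rw [not_or] at hc
    obtain ⟨hLne, hft⟩ := hc
    have hft' : flo = true := by cases flo with | false => simp at hft | true => rfl
    have hc' : PySem.List.sorted L (fun x => x.1) false ≠ [] ∧ flo = true :=
      ⟨by simpa [hnil] using hLne, hft'⟩
    rw [if_pos hc', if_neg (by simp [hLne, hft'])]
    have hsplit := gl_foldl_split L (by rw [hL]; exact gl_labels F) (none, none)
    have hoff : (PySem.List.sorted L (fun x => x.1) false).filter (fun l => l.2.2 == "LIGHTS OFF (START)")
        = PySem.List.sorted (L.filter (fun l => l.2.2 == "LIGHTS OFF (START)")) (fun x => x.1) false :=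
      gl_sorted_filter _ L
    have hon : (PySem.List.sorted L (fun x => x.1) false).filter (fun l => l.2.2 == "LIGHTS ON (STOP)")
        = PySem.List.sorted (L.filter (fun l => l.2.2 == "LIGHTS ON (STOP)")) (fun x => x.1) false :=
      gl_sorted_filter _ L
    have hhead : ((PySem.List.sorted L (fun x => x.1) false).filter (fun l => l.2.2 == "LIGHTS OFF (START)")).head?
        = (L.filter (fun e => e.2.2 == "LIGHTS OFF (START)")).foldl glMinStep none := by
      rw [hoff, PySem.List.sorted_eq_foldl_insertBy]
      exact gl_head?_foldl _ []
    have hlast : ((PySem.List.sorted L (fun x => x.1) false).filter (fun l => l.2.2 == "LIGHTS ON (STOP)")).getLast?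
        = (L.filter (fun e => e.2.2 == "LIGHTS ON (STOP)")).foldl glMaxStep none := by
      rw [hon, PySem.List.sorted_eq_foldl_insertBy]
      exact gl_getLast?_foldl _ [] (by simp)
    rw [hsplit]
    congr 1
    · rw [← hhead]
      cases hh : ((PySem.List.sorted L (fun x => x.1) false).filter (fun l => l.2.2 == "LIGHTS OFF (START)")) with
      | nil => simp
      | cons a t => simp
    · rw [← hlast]

-- ===== VERDICT (by name: the statement is the Claim_ definition above) =====
theorem get_light_events_spec : Claim_equal_get_light_events := by
  intro events flo _
  unfold Spec_get_light_events
  exact gl_main events flo
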